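-- pv_equiv track=rewrite | github.com/hunterhogan/mapFolding | mapFolding/_oeisFormulas/A000682NumPy.py | initializeA000682
-- ===== SOURCE A (Python) =====
-- def initializeA000682(n: int) -> dict[int, int]:
-- 	curveLocationsMAXIMUM: int = 1 << (2 * n + 4)
--
-- 	curveSeed: int = 5 - (n & 0b1) * 4
-- 	listCurveLocations: list[int] = [(curveSeed << 1) | curveSeed]
--
-- 	while listCurveLocations[-1] < curveLocationsMAXIMUM:
-- 		curveSeed = (curveSeed << 4) | 0b101
-- 		listCurveLocations.append((curveSeed << 1) | curveSeed)
--
-- 	return dict.fromkeys(listCurveLocations, 1)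
-- ===== SOURCE B (Python) =====
-- def initializeA000682(n: int) -> dict[int, int]:
-- 	# Each curve location equals 2**m - 1: exponents start at 4 (even n) or 2 (odd n)
-- 	# and step by 4 up to the inclusive limit 2*n + 8.
-- 	return {(1 << m) - 1: 1 for m in range(4 - 2 * (n & 1), 2 * n + 9, 4)}
-- ===== Notes on version B (the rewrite author's own statement) =====
-- stated objective: simpler
-- what changed: B replaces the seed-recurrence while-loop and list building with a direct one-line dict comprehension over the closed-form exponents: every key is 2^m - 1 with m ranging from 4 - 2*(n&1) to 2*n + 8 in steps of 4.
import Mathlib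
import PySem

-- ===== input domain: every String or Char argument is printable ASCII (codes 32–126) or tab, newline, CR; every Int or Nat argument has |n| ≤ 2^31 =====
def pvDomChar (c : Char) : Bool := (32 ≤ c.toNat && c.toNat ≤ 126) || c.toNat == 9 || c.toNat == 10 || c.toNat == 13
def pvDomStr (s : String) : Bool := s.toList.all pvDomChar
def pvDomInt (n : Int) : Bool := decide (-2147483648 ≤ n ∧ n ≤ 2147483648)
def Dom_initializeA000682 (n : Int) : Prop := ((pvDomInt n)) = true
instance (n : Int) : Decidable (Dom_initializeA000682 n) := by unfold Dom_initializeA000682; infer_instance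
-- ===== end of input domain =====

-- B replaces A's seed-recurrence while-loop with a direct range over the closed-form
-- exponents (every key is 2^m - 1); objective: simpler.

-- ===== PORT A =====
-- the 'while listCurveLocations[-1] < curveLocationsMAXIMUM' loop; fuel makes the
-- recursion total, (2*n+9).toNat is proved sufficient in the lemmas below.
-- 'Int.lor' = Python '|', '<<<' = Python '<<' (exact for nonnegative shift; inside
-- Pre_ every shift amount is nonnegative).
def a682Loop (fuel : Nat) (maxV : Int) (seed : Int) (lst : List Int) : List Int :=
  match fuel with
  | 0 => lst
  | f + 1 =>
    match PySem.List.pyGet? lst (-1) with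
    | none => lst  -- unreachable: the list is never empty
    | some last =>
      if last < maxV then
        let seed' : Int := Int.lor (seed <<< (4 : Int)) 5
        a682Loop f maxV seed' (lst ++ [Int.lor (seed' <<< (1 : Int)) seed'])
      else lst

def initializeA000682 (n : Int) : List (Int × Int) :=
  let curveLocationsMAXIMUM : Int := 1 <<< (2 * n + 4)
  let curveSeed : Int := 5 - (Int.land n 1) * 4
  (a682Loop (2 * n + 9).toNat curveLocationsMAXIMUM curveSeed
      [Int.lor (curveSeed <<< (1 : Int)) curveSeed]).map (fun k => (k, 1))

-- ===== PORT B =====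
def initializeA000682_alt (n : Int) : List (Int × Int) :=
  (PySem.List.pyRange (4 - 2 * Int.land n 1) (2 * n + 9) 4).map
    (fun m => ((1 : Int) <<< m - 1, 1))

-- ===== PRECONDITION & SPEC =====
-- Pre_ excludes exactly n ≤ -3, where Python A raises ValueError ('negative shift count').
def Pre_initializeA000682 (n : Int) : Prop := -2 ≤ n
instance (n : Int) : Decidable (Pre_initializeA000682 n) := by unfold Pre_initializeA000682; infer_instance
def pvWitness_initializeA000682 : Int := 3

def Spec_initializeA000682 (n : Int) (out : List (Int × Int)) : Prop := out = initializeA000682_alt n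
instance (n : Int) (out : List (Int × Int)) : Decidable (Spec_initializeA000682 n out) := by unfold Spec_initializeA000682; infer_instance

-- ===== CLAIM (what is proved, stated in full; the proofs are below) =====
def Claim_equal_initializeA000682 : Prop := ∀ (n : Int), Dom_initializeA000682 n → Pre_initializeA000682 n → Spec_initializeA000682 n (initializeA000682 n)

-- ===== LEMMAS AND PROOFS =====

-- the seed after k loop iterations: sd 0 = 1 (odd n), sd 1 = 5 (even n), step j ↦ j+2
def sd : Nat → Nat
  | 0 => 1
  | j + 1 => 4 * sd j + 1

lemma sd_pow (j : Nat) : 3 * sd j + 1 = 4 ^ (j + 1) := by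
  induction j with
  | zero => decide
  | succ j ih => simp only [sd]; rw [pow_succ]; omega

lemma sd_lor (j : Nat) : (2 * sd j) ||| sd j = 3 * sd j := by
  induction j with
  | zero => decide
  | succ j ih =>
    simp only [sd]
    generalize sd j = u at ih
    have a1 : 2 * (4 * u + 1) = Nat.bit false (4 * u + 1) := by simp only [Nat.bit_val, Bool.toNat_false, Bool.toNat_true]; omega
    have a2 : 4 * u + 1 = Nat.bit true (2 * u) := by simp only [Nat.bit_val, Bool.toNat_false, Bool.toNat_true]; omega
    have a3 : 2 * u = Nat.bit false u := by simp only [Nat.bit_val, Bool.toNat_false, Bool.toNat_true]; omega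
    calc (2 * (4 * u + 1)) ||| (4 * u + 1)
        = Nat.bit false (4 * u + 1) ||| Nat.bit true (2 * u) := by rw [← a1, ← a2]
      _ = Nat.bit true ((4 * u + 1) ||| (2 * u)) := by rw [Nat.lor_bit]; rfl
      _ = Nat.bit true (Nat.bit true (2 * u) ||| Nat.bit false u) := by rw [← a2, ← a3]
      _ = Nat.bit true (Nat.bit true ((2 * u) ||| u)) := by rw [Nat.lor_bit]; rfl
      _ = Nat.bit true (Nat.bit true (3 * u)) := by rw [ih]
      _ = 3 * (4 * u + 1) := by simp only [Nat.bit_val, Bool.toNat_false, Bool.toNat_true]; omega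

lemma lor16_5 (u : Nat) : (16 * u) ||| 5 = 16 * u + 5 := by
  have a1 : 16 * u = Nat.bit false (8 * u) := by simp only [Nat.bit_val, Bool.toNat_false, Bool.toNat_true]; omega
  have a2 : (5 : Nat) = Nat.bit true 2 := by decide
  have a3 : 8 * u = Nat.bit false (4 * u) := by simp only [Nat.bit_val, Bool.toNat_false, Bool.toNat_true]; omega
  have a4 : (2 : Nat) = Nat.bit false 1 := by decide
  have a5 : 4 * u = Nat.bit false (2 * u) := by simp only [Nat.bit_val, Bool.toNat_false, Bool.toNat_true]; omega
  have a6 : (1 : Nat) = Nat.bit true 0 := by decide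
  calc (16 * u) ||| 5
      = Nat.bit false (8 * u) ||| Nat.bit true 2 := by rw [← a1, ← a2]
    _ = Nat.bit true ((8 * u) ||| 2) := by rw [Nat.lor_bit]; rfl
    _ = Nat.bit true (Nat.bit false (4 * u) ||| Nat.bit false 1) := by rw [← a3, ← a4]
    _ = Nat.bit true (Nat.bit false ((4 * u) ||| 1)) := by rw [Nat.lor_bit]; rfl
    _ = Nat.bit true (Nat.bit false (Nat.bit false (2 * u) ||| Nat.bit true 0)) := by rw [← a5, ← a6]
    _ = Nat.bit true (Nat.bit false (Nat.bit true ((2 * u) ||| 0))) := by rw [Nat.lor_bit]; rfl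
    _ = 16 * u + 5 := by simp only [Nat.or_zero, Nat.bit_val, Bool.toNat_false, Bool.toNat_true]; omega

lemma int_lor_natCast (a b : Nat) : Int.lor (a : Int) (b : Int) = ((a ||| b : Nat) : Int) := rfl

lemma key_eq (j : Nat) :
    Int.lor (((sd j : Nat) : Int) <<< (1 : Int)) ((sd j : Nat) : Int) = 2 ^ (2 * j + 2) - 1 := by
  have h1 : ((sd j : Nat) : Int) <<< (1 : Int) = ((sd j <<< 1 : Nat) : Int) := by
    exact_mod_cast Int.shiftLeft_natCast (sd j) 1
  rw [h1, int_lor_natCast]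
  have h2 : sd j <<< 1 = 2 * sd j := by rw [Nat.shiftLeft_eq]; ring
  rw [h2, sd_lor]
  have h3 := sd_pow j
  have h4 : ((3 * sd j : Nat) : Int) = 4 ^ (j + 1) - 1 := by
    have h5 : ((3 * sd j + 1 : Nat) : Int) = ((4 ^ (j + 1) : Nat) : Int) := by exact_mod_cast congrArg (Nat.cast : Nat → Int) h3
    push_cast at h5 ⊢
    omega
  rw [h4, show (4 : Int) = 2 ^ 2 by norm_num, ← pow_mul]
  ring_nf

lemma seedstep_eq (j : Nat) :
    Int.lor (((sd j : Nat) : Int) <<< (4 : Int)) 5 = ((sd (j + 2) : Nat) : Int) := by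
  have h1 : ((sd j : Nat) : Int) <<< (4 : Int) = ((sd j <<< 4 : Nat) : Int) := by
    exact_mod_cast Int.shiftLeft_natCast (sd j) 4
  have h5 : (5 : Int) = ((5 : Nat) : Int) := by norm_num
  rw [h1, h5, int_lor_natCast]
  have h2 : sd j <<< 4 = 16 * sd j := by rw [Nat.shiftLeft_eq]; ring
  rw [h2, lor16_5]
  congr 1
  simp only [sd]
  ring

lemma pow_lt_pow_exp (a b : Nat) : ((2 : Int) ^ a - 1 < 2 ^ b) ↔ a ≤ b := by
  constructor
  · intro h
    by_contra hc
    have hb : b + 1 ≤ a := by omega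
    have h2 : (2 : Int) ^ (b + 1) ≤ 2 ^ a := pow_le_pow_right₀ (by norm_num) hb
    rw [pow_succ] at h2
    have h1 : (1 : Int) ≤ 2 ^ b := one_le_pow₀ (by norm_num)
    linarith
  · intro h
    have h2 : (2 : Int) ^ a ≤ 2 ^ b := pow_le_pow_right₀ (by norm_num) h
    linarith

lemma pyRange_four_nil (a b : Int) (h : b ≤ a) : PySem.List.pyRange a b 4 = [] := by
  rw [PySem.List.pyRange_of_pos a b (by norm_num)]
  simp [if_neg (not_lt.mpr h)]

lemma pyRange_four_cons (a b : Int) (h : a < b) :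
    PySem.List.pyRange a b 4 = a :: PySem.List.pyRange (a + 4) b 4 := by
  rw [PySem.List.pyRange_of_pos a b (by norm_num),
    PySem.List.pyRange_of_pos (a + 4) b (by norm_num)]
  obtain ⟨d, hd, hd1⟩ : ∃ d : Nat, b - a = (d : Int) ∧ 1 ≤ d := ⟨(b - a).toNat, by omega, by omega⟩
  have e1 : ((b - a + 4 - 1) / 4).toNat = ((d + 3) / 4 : Nat) := by
    rw [show b - a + 4 - 1 = ((d + 3 : Nat) : Int) by omega,
      show (4 : Int) = ((4 : Nat) : Int) by norm_num, ← Int.natCast_div]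
    rw [Int.toNat_natCast]
  have e2 : (if a + 4 < b then ((b - (a + 4) + 4 - 1) / 4).toNat else 0) = (d + 3) / 4 - 1 := by
    split_ifs with hb
    · rw [show b - (a + 4) + 4 - 1 = ((d - 1 : Nat) : Int) by omega,
        show (4 : Int) = ((4 : Nat) : Int) by norm_num, ← Int.natCast_div]
      have hd5 : 5 ≤ d := by omega
      rw [Int.toNat_natCast]
      omega
    · have hd4 : d ≤ 4 := by omega
      omega
  rw [if_pos h, e1, e2]
  obtain ⟨c, hc⟩ : ∃ c, (d + 3) / 4 = c + 1 := ⟨(d + 3) / 4 - 1, by omega⟩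
  rw [hc, show c + 1 - 1 = c by omega, List.range_succ_eq_map, List.map_cons, List.map_map]
  congr 1
  · norm_num
  · apply List.map_congr_left
    intro k _
    simp only [Function.comp_apply]
    push_cast
    ring

lemma a682Loop_spec (M : Nat) : ∀ (fuel : Nat) (j : Nat) (acc : List Int),
    M + 4 ≤ 2 * j + 2 + 4 * fuel →
    2 * j + 2 ≤ M + 4 →
    a682Loop fuel ((2 ^ M : Nat) : Int) ((sd j : Nat) : Int) (acc ++ [2 ^ (2 * j + 2) - 1]) =
      acc ++ (PySem.List.pyRange ((2 * j + 2 : Nat) : Int) (((M : Nat) : Int) + 5) 4).map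
        (fun m => (2 : Int) ^ m.toNat - 1) := by
  intro fuel
  induction fuel with
  | zero =>
    intro j acc h1 h2
    have hj : M + 1 ≤ 2 * j + 2 := by omega
    simp only [a682Loop]
    rw [pyRange_four_cons _ _ (by push_cast; omega),
      pyRange_four_nil _ _ (by push_cast; omega)]
    simp
    omega
  | succ f ih =>
    intro j acc h1 h2
    simp only [a682Loop, PySem.List.pyGet?_neg_one_append_singleton]
    have hcast : (((2 ^ M : Nat) : Int)) = (2 : Int) ^ M := by push_cast; ring
    by_cases hlt : (2 : Int) ^ (2 * j + 2) - 1 < ((2 ^ M : Nat) : Int)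
    · have hm : 2 * j + 2 ≤ M := by
        rw [hcast] at hlt
        exact (pow_lt_pow_exp _ _).mp hlt
      rw [if_pos hlt, seedstep_eq j, key_eq (j + 2)]
      have h1' : M + 4 ≤ 2 * (j + 2) + 2 + 4 * f := by omega
      have h2' : 2 * (j + 2) + 2 ≤ M + 4 := by omega
      have := ih (j + 2) (acc ++ [2 ^ (2 * j + 2) - 1]) h1' h2'
      rw [show 2 * (j + 2) + 2 = 2 * j + 6 by omega] at this
      rw [show (2 : Int) ^ (2 * (j + 2) + 2) - 1 = 2 ^ (2 * j + 6) - 1 by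
        rw [show 2 * (j + 2) + 2 = 2 * j + 6 by omega], this]
      rw [pyRange_four_cons (((2 * j + 2 : Nat) : Int)) _ (by push_cast; omega)]
      rw [show ((2 * j + 2 : Nat) : Int) + 4 = ((2 * j + 6 : Nat) : Int) by push_cast; ring]
      simp [List.append_assoc]
      omega
    · have hm : M + 1 ≤ 2 * j + 2 := by
        rw [hcast] at hlt
        by_contra hc
        exact hlt ((pow_lt_pow_exp _ _).mpr (by omega))
      rw [if_neg hlt]
      rw [pyRange_four_cons _ _ (by push_cast; omega),
        pyRange_four_nil _ _ (by push_cast; omega)]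
      simp
      omega

lemma ldiff_one (m : Nat) : Nat.ldiff 1 m = if m % 2 = 0 then 1 else 0 := by
  apply Nat.eq_of_testBit_eq
  intro i
  rw [Nat.testBit_ldiff]
  cases i with
  | zero =>
    simp only [Nat.testBit_zero]
    split_ifs with h <;> simp <;> omega
  | succ i =>
    have h1 : Nat.testBit 1 (i + 1) = false := Nat.testBit_lt_two_pow (by
      have : (1 : Nat) < 2 ^ 1 := by norm_num
      exact lt_of_lt_of_le this (Nat.pow_le_pow_right (by norm_num) (by omega)))
    have hp : (2 : Nat) ≤ 2 ^ (i + 1) := by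
      calc (2 : Nat) = 2 ^ 1 := by norm_num
        _ ≤ 2 ^ (i + 1) := Nat.pow_le_pow_right (by norm_num) (by omega)
    have h2 : Nat.testBit (if m % 2 = 0 then 1 else 0) (i + 1) = false := by
      split_ifs <;> exact Nat.testBit_lt_two_pow (by omega)
    rw [h1, h2, Bool.false_and]

lemma land_one (n : Int) : (Int.land n 1 = 0 ∧ n % 2 = 0) ∨ (Int.land n 1 = 1 ∧ n % 2 = 1) := by
  cases n with
  | ofNat m =>
    have h1 : Int.land (Int.ofNat m) 1 = ((m &&& 1 : Nat) : Int) := rfl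
    have h2 : (Int.ofNat m) % 2 = ((m % 2 : Nat) : Int) := by
      rw [Int.ofNat_eq_natCast]
      exact_mod_cast (Int.natCast_mod m 2).symm
    rw [h1, Nat.and_one_is_mod, h2]
    rcases Nat.mod_two_eq_zero_or_one m with h | h <;> rw [h] <;> [left; right] <;>
      exact ⟨by norm_num, by norm_num⟩
  | negSucc m =>
    have h1 : Int.land (Int.negSucc m) 1 = ((Nat.ldiff 1 m : Nat) : Int) := rfl
    have h2 : Int.negSucc m % 2 = 1 - ((m % 2 : Nat) : Int) := by
      rw [Int.negSucc_eq]
      push_cast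
      omega
    rw [h1, ldiff_one]
    rcases Nat.mod_two_eq_zero_or_one m with h | h <;> rw [h] at h2 ⊢
    · right
      exact ⟨by norm_num, by rw [h2]; norm_num⟩
    · left
      exact ⟨by norm_num, by rw [h2]; norm_num⟩

-- ===== VERDICT (by name: the statement is the Claim_ definition above) =====
theorem initializeA000682_spec : Claim_equal_initializeA000682 := by
  intro n _ hpre
  unfold Pre_initializeA000682 at hpre
  unfold Spec_initializeA000682
  dsimp only [initializeA000682, initializeA000682_alt]
  obtain ⟨M, hM⟩ : ∃ M : Nat, (M : Int) = 2 * n + 4 := ⟨(2 * n + 4).toNat, by omega⟩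
  have hfuel : (2 * n + 9).toNat = M + 5 := by omega
  have hmax : (1 : Int) <<< (2 * n + 4) = ((2 ^ M : Nat) : Int) := by
    rw [← hM, Int.one_shiftLeft]
  have hstop : 2 * n + 9 = ((M : Nat) : Int) + 5 := by omega
  rcases land_one n with ⟨hl, _⟩ | ⟨hl, _⟩
  · -- even n: seed 5 = sd 1, exponents start at 4
    rw [hl]
    have hseed : (5 : Int) - 0 * 4 = ((sd 1 : Nat) : Int) := by norm_num [sd]
    rw [hseed, key_eq 1, hfuel, hmax, hstop]
    have hloop := a682Loop_spec M (M + 5) 1 [] (by omega) (by omega)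
    simp only [List.nil_append] at hloop
    rw [show (2 : Int) ^ (2 * 1 + 2) - 1 = 2 ^ 4 - 1 by norm_num] at hloop
    rw [show ((2 * 1 + 2 : Nat) : Int) = 4 - 2 * 0 by norm_num] at hloop
    rw [hloop, List.map_map]
    apply List.map_congr_left
    intro m hm
    have := (PySem.List.mem_pyRange_iff_of_pos (by norm_num : (0:Int) < 4) m).mp hm
    have hm0 : 0 ≤ m := by omega
    have : (1 : Int) <<< m = (2 : Int) ^ m.toNat := by
      conv_lhs => rw [show m = ((m.toNat : Nat) : Int) by omega]
      rw [Int.one_shiftLeft]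
      push_cast
      ring
    simp [this]
  · -- odd n: seed 1 = sd 0, exponents start at 2
    rw [hl]
    have hseed : (5 : Int) - 1 * 4 = ((sd 0 : Nat) : Int) := by norm_num [sd]
    rw [hseed, key_eq 0, hfuel, hmax, hstop]
    have hloop := a682Loop_spec M (M + 5) 0 [] (by omega) (by omega)
    simp only [List.nil_append] at hloop
    rw [show (2 : Int) ^ (2 * 0 + 2) - 1 = 2 ^ 2 - 1 by norm_num] at hloop
    rw [show ((2 * 0 + 2 : Nat) : Int) = 4 - 2 * 1 by norm_num] at hloop
    rw [hloop, List.map_map]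
    apply List.map_congr_left
    intro m hm
    have := (PySem.List.mem_pyRange_iff_of_pos (by norm_num : (0:Int) < 4) m).mp hm
    have hm0 : 0 ≤ m := by omega
    have : (1 : Int) <<< m = (2 : Int) ^ m.toNat := by
      conv_lhs => rw [show m = ((m.toNat : Nat) : Int) by omega]
      rw [Int.one_shiftLeft]
      push_cast
      ring
    simp [this]
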